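-- pv_equiv track=rewrite | github.com/Atom3311/test | app/flows/checkin.py | build_checkin_feedback
-- ===== SOURCE A (Python) =====
-- def _dedupe(items: list[str]) -> list[str]:
--     seen: set[str] = set()
--     ordered: list[str] = []
--     for item in items:
--         if item in seen:
--             continue
--         seen.add(item)
--         ordered.append(item)
--     return ordered
--
-- def build_checkin_feedback(mood: int, anxiety: int, energy: int) -> str:
--     actions: list[str] = []
--     reflections: list[str] = []
--
--     if anxiety >= 7:
--         actions.append("2-3 минуты дыхания 4-6 или упражнение 5-4-3-2-1.")
--         reflections.append(
--             "Что именно сейчас тревожит и что из этого под вашим контролем?"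
--         )
--     if mood <= 3:
--         actions.append(
--             "Очень маленький шаг заботы о себе: вода, душ, короткая прогулка."
--         )
--         reflections.append("Что обычно дает вам хоть немного облегчения?")
--     if energy <= 3:
--         actions.append(
--             "Проверьте базовые вещи: сон, еда, вода, короткая пауза 10-15 минут."
--         )
--         reflections.append(
--             "Что сейчас забирает больше всего сил и что можно отложить?"
--         )
--     if mood >= 7 and anxiety <= 3 and energy >= 7:
--         actions.append("Сохраните то, что помогло сегодня, и повторите это завтра.")
--         reflections.append("Что из сегодняшнего стоит закрепить как привычку?")
--
--     if not actions:
--         actions.append(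
--             "Сделайте короткую паузу и отметьте дыхание и ощущения в теле."
--         )
--         reflections.append("Что могло повлиять на эти оценки сегодня?")
--
--     actions = _dedupe(actions)[:2]
--     reflections = _dedupe(reflections)[:2]
--
--     parts = [
--         f"Записал: настроение {mood}/10, тревога {anxiety}/10, энергия {energy}/10.",
--         "Что можно сделать сейчас:",
--     ]
--     parts.extend(f"- {item}" for item in actions)
--     parts.append("О чем подумать:")
--     parts.extend(f"- {item}" for item in reflections)
--     parts.append("Если хотите, можем обсудить подробнее.")
--     return "\n".join(parts)
-- ===== SOURCE B (Python) =====
-- _RULES = [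
--     (lambda m, a, e: a >= 7,
--      "2-3 минуты дыхания 4-6 или упражнение 5-4-3-2-1.",
--      "Что именно сейчас тревожит и что из этого под вашим контролем?"),
--     (lambda m, a, e: m <= 3,
--      "Очень маленький шаг заботы о себе: вода, душ, короткая прогулка.",
--      "Что обычно дает вам хоть немного облегчения?"),
--     (lambda m, a, e: e <= 3,
--      "Проверьте базовые вещи: сон, еда, вода, короткая пауза 10-15 минут.",
--      "Что сейчас забирает больше всего сил и что можно отложить?"),
--     (lambda m, a, e: m >= 7 and a <= 3 and e >= 7,
--      "Сохраните то, что помогло сегодня, и повторите это завтра.",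
--      "Что из сегодняшнего стоит закрепить как привычку?"),
-- ]
--
-- _FALLBACK = (
--     "Сделайте короткую паузу и отметьте дыхание и ощущения в теле.",
--     "Что могло повлиять на эти оценки сегодня?",
-- )
--
--
-- def build_checkin_feedback(mood: int, anxiety: int, energy: int) -> str:
--     fired = [(act, ref) for pred, act, ref in _RULES if pred(mood, anxiety, energy)]
--     if not fired:
--         fired = [_FALLBACK]
--     fired = fired[:2]
--     lines = [
--         f"Записал: настроение {mood}/10, тревога {anxiety}/10, энергия {energy}/10.",
--         "Что можно сделать сейчас:",
--     ]
--     lines += [f"- {act}" for act, _ in fired]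
--     lines.append("О чем подумать:")
--     lines += [f"- {ref}" for _, ref in fired]
--     lines.append("Если хотите, можем обсудить подробнее.")
--     return "\n".join(lines)
-- ===== Notes on version B (the rewrite author's own statement) =====
-- stated objective: idiomatic
-- what changed: Replaces the four explicit if-branches with a single filter pass over a data table of (predicate, action, reflection) rules, collects fired rules as pairs (so actions and reflections stay in lockstep and the now-redundant dedupe pass disappears), then assembles the same text.
import Mathlib
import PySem

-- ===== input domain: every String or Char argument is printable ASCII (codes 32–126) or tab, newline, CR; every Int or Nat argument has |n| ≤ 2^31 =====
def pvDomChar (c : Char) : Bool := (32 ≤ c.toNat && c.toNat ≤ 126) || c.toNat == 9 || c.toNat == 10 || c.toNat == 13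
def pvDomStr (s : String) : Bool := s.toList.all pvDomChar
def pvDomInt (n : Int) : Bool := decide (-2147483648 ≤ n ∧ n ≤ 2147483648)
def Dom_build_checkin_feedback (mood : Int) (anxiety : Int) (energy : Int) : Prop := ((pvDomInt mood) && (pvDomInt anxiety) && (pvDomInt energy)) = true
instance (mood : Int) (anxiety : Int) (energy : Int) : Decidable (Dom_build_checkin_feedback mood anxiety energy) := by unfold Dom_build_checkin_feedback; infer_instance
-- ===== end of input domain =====

-- B replaces A's four explicit if-branches (and the then-redundant dedupe pass) by a
-- single filter over a data table of (predicate, action, reflection) rules: objective 'idiomatic'.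

-- shared string literals (identical text in both Pythons)
def pvA1 : String := "2-3 минуты дыхания 4-6 или упражнение 5-4-3-2-1."
def pvR1 : String := "Что именно сейчас тревожит и что из этого под вашим контролем?"
def pvA2 : String := "Очень маленький шаг заботы о себе: вода, душ, короткая прогулка."
def pvR2 : String := "Что обычно дает вам хоть немного облегчения?"
def pvA3 : String := "Проверьте базовые вещи: сон, еда, вода, короткая пауза 10-15 минут."
def pvR3 : String := "Что сейчас забирает больше всего сил и что можно отложить?"
def pvA4 : String := "Сохраните то, что помогло сегодня, и повторите это завтра."
def pvR4 : String := "Что из сегодняшнего стоит закрепить как привычку?"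
def pvA0 : String := "Сделайте короткую паузу и отметьте дыхание и ощущения в теле."
def pvR0 : String := "Что могло повлиять на эти оценки сегодня?"

-- f"Записал: настроение {mood}/10, тревога {anxiety}/10, энергия {energy}/10."
def pvHeader (mood : Int) (anxiety : Int) (energy : Int) : String :=
  "Записал: настроение " ++ PySem.Int.toStr mood ++ "/10, тревога " ++ PySem.Int.toStr anxiety
    ++ "/10, энергия " ++ PySem.Int.toStr energy ++ "/10."

-- ===== PORT A =====
-- _dedupe: fold over (seen : set, ordered : list), exactly A's loop
def pvDedupe (items : List String) : List String :=
  (items.foldl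
    (fun (st : PySem.Set String × List String) item =>
      if PySem.Set.contains st.1 item then st
      else (PySem.Set.add st.1 item, st.2 ++ [item]))
    ((PySem.Set.empty : PySem.Set String), ([] : List String))).2

def build_checkin_feedback (mood : Int) (anxiety : Int) (energy : Int) : String :=
  let actions : List String := []
  let reflections : List String := []
  let (actions, reflections) :=
    if anxiety ≥ 7 then (actions ++ [pvA1], reflections ++ [pvR1]) else (actions, reflections)
  let (actions, reflections) :=
    if mood ≤ 3 then (actions ++ [pvA2], reflections ++ [pvR2]) else (actions, reflections)
  let (actions, reflections) :=
    if energy ≤ 3 then (actions ++ [pvA3], reflections ++ [pvR3]) else (actions, reflections)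
  let (actions, reflections) :=
    if mood ≥ 7 ∧ anxiety ≤ 3 ∧ energy ≥ 7 then (actions ++ [pvA4], reflections ++ [pvR4])
    else (actions, reflections)
  let (actions, reflections) :=
    if actions = [] then (actions ++ [pvA0], reflections ++ [pvR0]) else (actions, reflections)
  let actions := PySem.List.slice (pvDedupe actions) none (some 2)        -- [:2]
  let reflections := PySem.List.slice (pvDedupe reflections) none (some 2)
  let parts : List String :=
    [pvHeader mood anxiety energy, "Что можно сделать сейчас:"]
      ++ actions.map (fun item => "- " ++ item)
      ++ ["О чем подумать:"]
      ++ reflections.map (fun item => "- " ++ item)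
      ++ ["Если хотите, можем обсудить подробнее."]
  PySem.Str.join "\n" parts

-- ===== PORT B =====
-- the rules table (_RULES with the predicates applied to the arguments)
def pvRules (mood : Int) (anxiety : Int) (energy : Int) : List (Bool × String × String) :=
  [ (decide (anxiety ≥ 7), pvA1, pvR1),
    (decide (mood ≤ 3), pvA2, pvR2),
    (decide (energy ≤ 3), pvA3, pvR3),
    (decide (mood ≥ 7 ∧ anxiety ≤ 3 ∧ energy ≥ 7), pvA4, pvR4) ]

def build_checkin_feedback_alt (mood : Int) (anxiety : Int) (energy : Int) : String :=
  let fired := ((pvRules mood anxiety energy).filter (fun r => r.1)).map (fun r => r.2)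
  let fired := if fired = [] then [(pvA0, pvR0)] else fired
  let fired := PySem.List.slice fired none (some 2)                        -- [:2]
  let lines : List String :=
    [pvHeader mood anxiety energy, "Что можно сделать сейчас:"]
      ++ fired.map (fun p => "- " ++ p.1)
      ++ ["О чем подумать:"]
      ++ fired.map (fun p => "- " ++ p.2)
      ++ ["Если хотите, можем обсудить подробнее."]
  PySem.Str.join "\n" lines

-- ===== PRECONDITION & SPEC =====
def Spec_build_checkin_feedback (mood : Int) (anxiety : Int) (energy : Int) (out : String) : Prop := out = build_checkin_feedback_alt mood anxiety energy
instance (mood : Int) (anxiety : Int) (energy : Int) (out : String) : Decidable (Spec_build_checkin_feedback mood anxiety energy out) := by unfold Spec_build_checkin_feedback; infer_instance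

-- ===== CLAIM (what is proved, stated in full; the proofs are below) =====
def Claim_equal_build_checkin_feedback : Prop := ∀ (mood : Int) (anxiety : Int) (energy : Int), Dom_build_checkin_feedback mood anxiety energy → Spec_build_checkin_feedback mood anxiety energy (build_checkin_feedback mood anxiety energy)

-- ===== LEMMAS AND PROOFS =====

-- ===== VERDICT (by name: the statement is the Claim_ definition above) =====
theorem build_checkin_feedback_spec : Claim_equal_build_checkin_feedback := by
  intro mood anxiety energy _
  unfold Spec_build_checkin_feedback build_checkin_feedback build_checkin_feedback_alt pvRules
  by_cases h1 : anxiety ≥ 7 <;> by_cases h2 : mood ≤ 3 <;> by_cases h3 : energy ≤ 3 <;>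
    by_cases h4 : mood ≥ 7 ∧ anxiety ≤ 3 ∧ energy ≥ 7 <;>
    simp [h1, h2, h3, h4, pvDedupe, PySem.Set.add, PySem.Set.contains, PySem.Set.empty,
      PySem.List.slice, pvA1, pvA2, pvA3, pvA4, pvA0, pvR1, pvR2, pvR3, pvR4, pvR0]
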